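-- pv_equiv track=rewrite | github.com/harbecke/HexHex | hexhex/solver/encoding.py | player_wins_with_move
-- ===== SOURCE A (Python) =====
-- def player_wins_with_move(player_mask: int, move_idx: int, neighbors: tuple[int, ...],
--                           edge_a: int, edge_b: int) -> bool:
--     """BFS the player's connected component containing move_idx; check it touches both edges."""
--     visited = 0
--     frontier = 1 << move_idx
--     reached_a = False
--     reached_b = False
--     while frontier:
--         bit = frontier & -frontier
--         frontier ^= bit
--         if visited & bit:
--             continue
--         visited |= bit
--         if bit & edge_a:
--             reached_a = True
--         if bit & edge_b:
--             reached_b = True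
--         if reached_a and reached_b:
--             return True
--         i = bit.bit_length() - 1
--         frontier |= neighbors[i] & player_mask & ~visited
--     return False
-- ===== SOURCE B (Python) =====
-- def player_wins_with_move(player_mask: int, move_idx: int, neighbors: tuple[int, ...],
--                           edge_a: int, edge_b: int) -> bool:
--     """Saturate the reachable set to a fixpoint (round-based closure), then test both edges."""
--     reach = 1 << move_idx
--     while True:
--         succ = 0
--         m = reach
--         while m:
--             bit = m & -m
--             m ^= bit
--             succ |= neighbors[bit.bit_length() - 1]
--         new = reach | (succ & player_mask)
--         if new == reach:
--             break
--         reach = new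
--     return bool(reach & edge_a) and bool(reach & edge_b)
-- ===== Notes on version B (the rewrite author's own statement) =====
-- stated objective: alternative
-- what changed: Replaces the early-exiting worklist BFS (visited set, per-bit frontier popping, reached-edge flags) by a round-based saturation: repeatedly OR the neighbor masks of every reached cell into the reach set until a fixpoint, then test both edge masks once against the final set.
-- outside the precondition, e.g. on player_wins_with_move(1073741827, 0, (1073741837, 2), 1, 1): A returns True, B raises IndexError; on player_wins_with_move(1073741831, 0, (0, 4, 1073741837), 1, 2): A returns False, B returns False
import Mathlib
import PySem

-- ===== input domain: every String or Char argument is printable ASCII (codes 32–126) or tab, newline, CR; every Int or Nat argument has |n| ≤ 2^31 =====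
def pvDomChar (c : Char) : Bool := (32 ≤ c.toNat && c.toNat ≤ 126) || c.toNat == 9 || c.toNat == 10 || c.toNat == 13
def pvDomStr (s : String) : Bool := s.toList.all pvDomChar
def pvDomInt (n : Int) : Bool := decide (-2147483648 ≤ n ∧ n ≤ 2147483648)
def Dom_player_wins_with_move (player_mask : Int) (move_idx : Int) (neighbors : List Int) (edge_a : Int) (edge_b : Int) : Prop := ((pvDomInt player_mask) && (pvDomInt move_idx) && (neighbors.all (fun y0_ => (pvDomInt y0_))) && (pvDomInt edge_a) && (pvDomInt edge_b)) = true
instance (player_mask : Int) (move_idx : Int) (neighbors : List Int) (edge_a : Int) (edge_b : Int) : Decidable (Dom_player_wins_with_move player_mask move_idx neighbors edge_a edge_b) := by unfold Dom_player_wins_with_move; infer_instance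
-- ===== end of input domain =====

-- B replaces A's early-exiting worklist BFS (visited set, frontier popping, reached-edge flags)
-- by a round-based saturation of the reach set to a fixpoint, then one test of each edge mask
-- (objective: alternative; equivalence of the RETURN value on Pre_).

-- ===== PORT A =====
-- the while loop of A; fuel-based (ample under Pre_; Python diverges or raises only outside Pre_)
def pwLoopA (neighbors : List Int) (player_mask edge_a edge_b : Int) :
    Nat → Int → Int → Bool → Bool → Bool
  | 0, _, _, _, _ => false
  | fuel+1, visited, frontier, reached_a, reached_b =>
    if frontier = 0 then false
    else
      let bit := PySem.Int.band frontier (-frontier)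
      let frontier1 := PySem.Int.bxor frontier bit
      if PySem.Int.band visited bit ≠ 0 then
        pwLoopA neighbors player_mask edge_a edge_b fuel visited frontier1 reached_a reached_b
      else
        let visited1 := PySem.Int.bor visited bit
        let ra := reached_a || decide (PySem.Int.band bit edge_a ≠ 0)
        let rb := reached_b || decide (PySem.Int.band bit edge_b ≠ 0)
        if ra && rb then true
        else
          match PySem.List.pyGet? neighbors (((PySem.Int.bitLength bit : Nat) : Int) - 1) with
          | none => false
          | some nb =>
            pwLoopA neighbors player_mask edge_a edge_b fuel visited1
              (PySem.Int.bor frontier1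
                (PySem.Int.band (PySem.Int.band nb player_mask) (Int.not visited1))) ra rb

def player_wins_with_move (player_mask : Int) (move_idx : Int) (neighbors : List Int) (edge_a : Int) (edge_b : Int) : Bool :=
  if move_idx < 0 then false  -- Python raises ValueError on 1 << negative; outside Pre_
  else
    pwLoopA neighbors player_mask edge_a edge_b
      ((neighbors.length + 1) * (neighbors.length + 1) + 2)
      0 ((1 : Int) <<< move_idx.toNat) false false

-- ===== PORT B =====
-- inner 'while m' / outer 'while True' loops of Source B (none / fuel cutoff only outside Pre_)
def pwSucc (neighbors : List Int) : Nat → Int → Int → Option Int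
  | 0, _, acc => some acc
  | fuel+1, m, acc =>
    if m = 0 then some acc
    else
      let bit := PySem.Int.band m (-m)
      let m1 := PySem.Int.bxor m bit
      match PySem.List.pyGet? neighbors (((PySem.Int.bitLength bit : Nat) : Int) - 1) with
      | none => none
      | some nb => pwSucc neighbors fuel m1 (PySem.Int.bor acc nb)
def pwFix (neighbors : List Int) (player_mask : Int) : Nat → Int → Int
  | 0, reach => reach
  | fuel+1, reach =>
    match pwSucc neighbors (neighbors.length + 1) reach 0 with
    | none => reach
    | some succ =>
      let new := PySem.Int.bor reach (PySem.Int.band succ player_mask)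
      if new = reach then reach
      else pwFix neighbors player_mask fuel new

def player_wins_with_move_alt (player_mask : Int) (move_idx : Int) (neighbors : List Int) (edge_a : Int) (edge_b : Int) : Bool :=
  if move_idx < 0 then false  -- Python raises ValueError on 1 << negative; outside Pre_
  else
    let reach := pwFix neighbors player_mask (neighbors.length + 2) ((1 : Int) <<< move_idx.toNat)
    decide (PySem.Int.band reach edge_a ≠ 0) && decide (PySem.Int.band reach edge_b ≠ 0)

-- ===== PRECONDITION & SPEC =====
-- Pre_ restricts to the natural domain where the search stays on the board: 0 ≤ move_idx <
-- len(neighbors) and every masked neighbor set neighbors[i] & player_mask is a nonnegative mask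
-- below 2^len(neighbors) (player_mask itself is unrestricted: any sign, any high bits).  Outside
-- it A raises ValueError/IndexError as soon as an off-board bit is expanded, and returns a value
-- only when the off-board bit is unreachable (then B returns the same value) or when A's early
-- exit fires before the bad cell is popped — there B's full saturation itself raises IndexError.
def Pre_player_wins_with_move (player_mask : Int) (move_idx : Int) (neighbors : List Int) (edge_a : Int) (edge_b : Int) : Prop :=
  0 ≤ move_idx ∧ move_idx < neighbors.length ∧
  ∀ x ∈ neighbors, 0 ≤ PySem.Int.band x player_mask ∧
    PySem.Int.band x player_mask < 2 ^ neighbors.length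

instance (player_mask : Int) (move_idx : Int) (neighbors : List Int) (edge_a : Int) (edge_b : Int) : Decidable (Pre_player_wins_with_move player_mask move_idx neighbors edge_a edge_b) := by unfold Pre_player_wins_with_move; infer_instance

def pvWitness_player_wins_with_move : Int × Int × List Int × Int × Int := (-2, 0, [2, 5, 3], 1, 4)

def Spec_player_wins_with_move (player_mask : Int) (move_idx : Int) (neighbors : List Int) (edge_a : Int) (edge_b : Int) (out : Bool) : Prop := out = player_wins_with_move_alt player_mask move_idx neighbors edge_a edge_b
instance (player_mask : Int) (move_idx : Int) (neighbors : List Int) (edge_a : Int) (edge_b : Int) (out : Bool) : Decidable (Spec_player_wins_with_move player_mask move_idx neighbors edge_a edge_b out) := by unfold Spec_player_wins_with_move; infer_instance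

-- ===== CLAIM (what is proved, stated in full; the proofs are below) =====
def Claim_equal_player_wins_with_move : Prop := ∀ (player_mask : Int) (move_idx : Int) (neighbors : List Int) (edge_a : Int) (edge_b : Int), Dom_player_wins_with_move player_mask move_idx neighbors edge_a edge_b → Pre_player_wins_with_move player_mask move_idx neighbors edge_a edge_b → Spec_player_wins_with_move player_mask move_idx neighbors edge_a edge_b (player_wins_with_move player_mask move_idx neighbors edge_a edge_b)

-- ===== LEMMAS AND PROOFS =====
theorem pw_sub_eq_xor (a : Nat) : ∀ b, a &&& b = b → a - b = a ^^^ b := by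
  induction a using Nat.strong_induction_on with
  | _ a ih =>
    intro b h
    rcases Nat.eq_zero_or_pos a with rfl | ha
    · simp at h; simp [h]
    · have h2 : a / 2 &&& b / 2 = b / 2 := by rw [← Nat.and_div_two, h]
      have ihh : a / 2 - b / 2 = a / 2 ^^^ b / 2 := ih (a / 2) (Nat.div_lt_self ha (by omega)) _ h2
      have hble2 : b / 2 ≤ a / 2 := Nat.div_le_div_right (h ▸ Nat.and_le_left)
      have hx2 : (a ^^^ b) / 2 = a / 2 - b / 2 := by rw [Nat.xor_div_two, ← ihh]
      have hxp : (a ^^^ b) % 2 = (a + b) % 2 := Nat.xor_mod_two_eq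
      have h0 : (a.testBit 0 && b.testBit 0) = b.testBit 0 := by rw [← Nat.testBit_land, h]
      have hab : b % 2 ≤ a % 2 := by
        cases ha0 : a.testBit 0 <;> cases hb0 : b.testBit 0 <;>
          rw [ha0, hb0] at h0 <;>
          simp only [Nat.testBit_zero, decide_eq_true_eq, decide_eq_false_iff_not] at ha0 hb0 <;>
          first | omega | simp at h0
      omega

theorem pw_sub_and (a b : Nat) : a - (a &&& b) = Nat.ldiff a b := by
  have h : a &&& (a &&& b) = (a &&& b) := by rw [← Nat.and_assoc, Nat.and_self]
  rw [pw_sub_eq_xor a (a &&& b) h]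
  apply Nat.eq_of_testBit_eq
  intro i
  simp only [Nat.testBit_xor, Nat.testBit_land, Nat.testBit_ldiff]
  cases a.testBit i <;> cases b.testBit i <;> rfl

def pwLowIdx (m : Nat) : Nat :=
  if m % 2 = 1 ∨ m ≤ 1 then 0 else pwLowIdx (m / 2) + 1
decreasing_by exact Nat.div_lt_self (by omega) (by omega)

theorem pw_testBit_lowIdx (m : Nat) (hm : 0 < m) : m.testBit (pwLowIdx m) = true := by
  induction m using Nat.strong_induction_on with
  | _ m ih =>
    rw [pwLowIdx]
    split
    · rename_i h
      have hodd : m % 2 = 1 := by rcases h with h | h <;> omega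
      simp [Nat.testBit_zero, hodd]
    · rename_i h
      push Not at h
      rw [Nat.testBit_add_one]
      exact ih (m / 2) (Nat.div_lt_self hm (by omega)) (by omega)

theorem pw_ldiff_pred (m : Nat) (hm : 0 < m) : Nat.ldiff m (m - 1) = 2 ^ pwLowIdx m := by
  induction m using Nat.strong_induction_on with
  | _ m ih =>
    rw [pwLowIdx]
    split
    · rename_i h
      have hodd : m % 2 = 1 := by rcases h with h | h <;> omega
      apply Nat.eq_of_testBit_eq
      intro i
      rw [Nat.testBit_ldiff]
      cases i with
      | zero =>
        have hme : (m - 1) % 2 = 0 := by omega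
        simp [Nat.testBit_zero, hodd, hme]
      | succ j =>
        simp only [Nat.testBit_add_one]
        have hd : (m - 1) / 2 = m / 2 := by omega
        rw [hd, pow_zero]
        have h12 : (1 : Nat) / 2 = 0 := by omega
        simp [h12]
    · rename_i h
      push Not at h
      have heven : m % 2 = 0 := by omega
      have ihh := ih (m / 2) (Nat.div_lt_self hm (by omega)) (by omega)
      apply Nat.eq_of_testBit_eq
      intro i
      rw [Nat.testBit_ldiff]
      cases i with
      | zero =>
        have hmo : (2 ^ pwLowIdx (m / 2) * 2) % 2 = 0 := Nat.mul_mod_left _ 2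
        simp [Nat.testBit_zero, heven, Nat.pow_succ, hmo]
      | succ j =>
        simp only [Nat.testBit_add_one]
        have hd : (m - 1) / 2 = m / 2 - 1 := by omega
        rw [hd, ← Nat.testBit_ldiff, ihh]
        have hp : (2 : Nat) ^ (pwLowIdx (m / 2) + 1) / 2 = 2 ^ pwLowIdx (m / 2) := by
          rw [Nat.pow_succ]; exact Nat.mul_div_cancel _ (by omega)
        rw [hp]

theorem pw_bitLength_two_pow (k : Nat) : PySem.Int.bitLength ((2 ^ k : Nat) : Int) = k + 1 := by
  induction k with
  | zero => decide
  | succ j ih =>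
    rw [PySem.Int.bitLength_natCast (by positivity)]
    have h : 2 ^ (j + 1) / 2 = 2 ^ j := by
      rw [Nat.pow_succ]; exact Nat.mul_div_cancel _ (by omega)
    rw [h, ih]
def pwBitI (e : Int) (j : Nat) : Bool := if 0 ≤ e then e.toNat.testBit j else !((-e - 1).toNat.testBit j)
def pwMaskI (m : Nat) (e : Int) : Nat := if 0 ≤ e then m &&& e.toNat else Nat.ldiff m (-e - 1).toNat

theorem pw_band_eq (m : Nat) (e : Int) : PySem.Int.band (m : Int) e = ((pwMaskI m e : Nat) : Int) := by
  unfold PySem.Int.band pwMaskI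
  by_cases he : 0 ≤ e
  · simp [he, Int.toNat_natCast]
  · simp [he, Int.toNat_natCast, pw_sub_and]

theorem pw_maskI_testBit (m : Nat) (e : Int) (j : Nat) :
    (pwMaskI m e).testBit j = (m.testBit j && pwBitI e j) := by
  unfold pwMaskI pwBitI
  by_cases he : 0 ≤ e <;> simp [he, Nat.testBit_land, Nat.testBit_ldiff]

theorem pw_not_cast (v : Nat) : Int.not (v : Int) = -(v : Int) - 1 := by
  rw [show Int.not (v:Int) = -((v:Int)+1) from rfl]; ring

theorem pw_band_low (f : Nat) (hf : 0 < f) :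
    PySem.Int.band (f : Int) (-(f : Int)) = ((2 ^ pwLowIdx f : Nat) : Int) := by
  have hneg : ¬ (0 ≤ -(f : Int)) := by omega
  rw [pw_band_eq]
  unfold pwMaskI
  rw [if_neg hneg]
  have h1 : (-(-(f:Int)) - 1).toNat = f - 1 := by omega
  rw [h1, pw_ldiff_pred f hf]

theorem pw_bitI_bor (a b : Int) (j : Nat) :
    pwBitI (PySem.Int.bor a b) j = (pwBitI a j || pwBitI b j) := by
  unfold PySem.Int.bor pwBitI
  by_cases ha : 0 ≤ a <;> by_cases hb : 0 ≤ b <;>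
    simp only [ha, hb, if_true, if_false, pw_sub_and]
  · simp [ha, hb]
  · have h0 : (0:Int) ≤ ((Nat.ldiff (-b-1).toNat a.toNat : Nat) : Int) := Int.natCast_nonneg _
    have h1 : (-(-((Nat.ldiff (-b-1).toNat a.toNat : Nat) : Int) - 1) - 1) = ((Nat.ldiff (-b-1).toNat a.toNat : Nat) : Int) := by ring
    rw [if_neg (by omega), h1, Int.toNat_natCast, Nat.testBit_ldiff]
    cases a.toNat.testBit j <;> cases (-b-1).toNat.testBit j <;> rfl
  · have h0 : (0:Int) ≤ ((Nat.ldiff (-a-1).toNat b.toNat : Nat) : Int) := Int.natCast_nonneg _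
    have h1 : (-(-((Nat.ldiff (-a-1).toNat b.toNat : Nat) : Int) - 1) - 1) = ((Nat.ldiff (-a-1).toNat b.toNat : Nat) : Int) := by ring
    rw [if_neg (by omega), h1, Int.toNat_natCast, Nat.testBit_ldiff]
    cases b.toNat.testBit j <;> cases (-a-1).toNat.testBit j <;> rfl
  · have h0 : (0:Int) ≤ (((-a-1).toNat &&& (-b-1).toNat : Nat) : Int) := Int.natCast_nonneg _
    have h1 : (-(-(((-a-1).toNat &&& (-b-1).toNat : Nat) : Int) - 1) - 1) = (((-a-1).toNat &&& (-b-1).toNat : Nat) : Int) := by ring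
    rw [if_neg (by omega), h1, Int.toNat_natCast, Nat.testBit_land]
    cases (-a-1).toNat.testBit j <;> cases (-b-1).toNat.testBit j <;> rfl

theorem pw_bitI_band (a b : Int) (j : Nat) :
    pwBitI (PySem.Int.band a b) j = (pwBitI a j && pwBitI b j) := by
  unfold PySem.Int.band pwBitI
  by_cases ha : 0 ≤ a <;> by_cases hb : 0 ≤ b <;>
    simp only [ha, hb, if_true, if_false, pw_sub_and]
  · simp [ha, hb, Nat.testBit_land]
  · have h0 : (0:Int) ≤ ((Nat.ldiff a.toNat (-b-1).toNat : Nat) : Int) := Int.natCast_nonneg _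
    rw [if_pos h0, Int.toNat_natCast, Nat.testBit_ldiff]
  · have h0 : (0:Int) ≤ ((Nat.ldiff b.toNat (-a-1).toNat : Nat) : Int) := Int.natCast_nonneg _
    rw [if_pos h0, Int.toNat_natCast, Nat.testBit_ldiff]
    cases b.toNat.testBit j <;> cases (-a-1).toNat.testBit j <;> rfl
  · have h0 : ¬ ((0:Int) ≤ -(((-a-1).toNat ||| (-b-1).toNat : Nat) : Int) - 1) := by
      have := Int.natCast_nonneg ((-a-1).toNat ||| (-b-1).toNat)
      omega
    have h1 : (-(-(((-a-1).toNat ||| (-b-1).toNat : Nat) : Int) - 1) - 1) = (((-a-1).toNat ||| (-b-1).toNat : Nat) : Int) := by ring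
    rw [if_neg h0, h1, Int.toNat_natCast, Nat.testBit_lor]
    cases (-a-1).toNat.testBit j <;> cases (-b-1).toNat.testBit j <;> rfl

theorem pw_bitI_natCast (v : Nat) (j : Nat) : pwBitI ((v : Nat) : Int) j = v.testBit j := by
  unfold pwBitI
  rw [if_pos (Int.natCast_nonneg v), Int.toNat_natCast]

theorem pw_nonneg_of_bitI (x : Int) (n : Nat) (h : ∀ j, pwBitI x j = true → j < n) : 0 ≤ x := by
  by_contra hx
  have hneg : ¬ (0 ≤ x) := hx
  have hj : pwBitI x (n + (-x - 1).toNat) = true := by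
    unfold pwBitI
    rw [if_neg hneg]
    have hlt : (-x - 1).toNat < 2 ^ (n + (-x - 1).toNat) := by
      calc (-x - 1).toNat < 2 ^ (-x - 1).toNat := Nat.lt_two_pow_self
        _ ≤ 2 ^ (n + (-x - 1).toNat) := Nat.pow_le_pow_right (by omega) (by omega)
    rw [Nat.testBit_eq_false_of_lt hlt]
    rfl
  have := h _ hj
  omega

theorem pw_natCast_ne_zero_iff (x : Nat) : ((x : Int) ≠ 0) ↔ ∃ j, x.testBit j = true := by
  constructor
  · intro h
    by_contra hc
    push Not at hc
    have : x = 0 := Nat.eq_of_testBit_eq (fun i => by simp [hc i])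
    simp [this] at h
  · rintro ⟨j, hj⟩ h
    have : x = 0 := by exact_mod_cast h
    subst this
    simp at hj

theorem pw_bandNe (x : Nat) (e : Int) :
    (PySem.Int.band (x : Int) e ≠ 0) ↔ ∃ j, x.testBit j = true ∧ pwBitI e j = true := by
  rw [pw_band_eq, pw_natCast_ne_zero_iff]
  constructor
  · rintro ⟨j, hj⟩
    rw [pw_maskI_testBit] at hj
    exact ⟨j, by simpa using hj⟩
  · rintro ⟨j, h1, h2⟩
    exact ⟨j, by simp [pw_maskI_testBit, h1, h2]⟩

def pwBits (n x : Nat) : Finset ℕ := (Finset.range n).filter (fun i => x.testBit i)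

theorem pw_mem_bits {n x i : Nat} : i ∈ pwBits n x ↔ (i < n ∧ x.testBit i = true) := by
  simp [pwBits]

theorem pw_mem_bits_of_lt {n x : Nat} (h : x < 2 ^ n) (i : Nat) :
    i ∈ pwBits n x ↔ x.testBit i = true := by
  rw [pw_mem_bits]
  constructor
  · exact fun h => h.2
  · intro hi
    refine ⟨?_, hi⟩
    by_contra hc
    rw [Nat.testBit_eq_false_of_lt (lt_of_lt_of_le h (Nat.pow_le_pow_right (by omega) (by omega)))] at hi
    exact Bool.false_ne_true hi

theorem pw_bits_card_le (n x : Nat) : (pwBits n x).card ≤ n := by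
  calc (pwBits n x).card ≤ (Finset.range n).card := Finset.card_filter_le _ _
    _ = n := Finset.card_range n

theorem pw_lt_pow_of_bits {n x : Nat} (h : ∀ i, x.testBit i = true → i < n) : x < 2 ^ n := by
  apply Nat.lt_pow_two_of_testBit
  intro i hi
  by_contra hc
  have := h i (by simpa using hc)
  omega

theorem pw_bits_xor_pow {n x k : Nat} (hk : x.testBit k = true) :
    pwBits n (x ^^^ 2 ^ k) = (pwBits n x).erase k := by
  ext i
  rw [Finset.mem_erase, pw_mem_bits, pw_mem_bits, Nat.testBit_xor, Nat.testBit_two_pow]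
  by_cases hik : k = i
  · subst hik; simp [hk]
  · simp [hik]
    tauto

theorem pw_bits_or_pow {n x k : Nat} (hk : k < n) :
    pwBits n (x ||| 2 ^ k) = insert k (pwBits n x) := by
  ext i
  rw [Finset.mem_insert, pw_mem_bits, pw_mem_bits, Nat.testBit_lor, Nat.testBit_two_pow]
  by_cases hik : k = i
  · subst hik; simp [hk]
  · simp [hik]
    tauto

def pwMA (nbm : Nat → Nat) (Ea Eb : Nat → Bool) : Nat → Nat → Nat → Bool → Bool → Bool
  | 0, _, _, _, _ => false
  | fuel+1, v, f, ra, rb =>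
    if f = 0 then false
    else
      let k := pwLowIdx f
      let f1 := f ^^^ 2 ^ k
      if v.testBit k then pwMA nbm Ea Eb fuel v f1 ra rb
      else
        let v1 := v ||| 2 ^ k
        let ra1 := ra || Ea k
        let rb1 := rb || Eb k
        if ra1 && rb1 then true
        else pwMA nbm Ea Eb fuel v1 (f1 ||| Nat.ldiff (nbm k) v1) ra1 rb1

theorem pw_band_pow_ne (v k : Nat) :
    (PySem.Int.band (v : Int) ((2 ^ k : Nat) : Int) ≠ 0) ↔ v.testBit k = true := by
  rw [pw_band_eq, pw_natCast_ne_zero_iff]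
  unfold pwMaskI
  rw [if_pos (Int.natCast_nonneg _), Int.toNat_natCast]
  constructor
  · rintro ⟨j, hj⟩
    rw [Nat.testBit_land, Nat.testBit_two_pow] at hj
    rcases Bool.and_eq_true_iff.mp hj with ⟨h1, h2⟩
    simp at h2
    subst h2
    exact h1
  · intro h
    exact ⟨k, by simp [Nat.testBit_land, Nat.testBit_two_pow, h]⟩

theorem pw_band_pow_edge (k : Nat) (e : Int) :
    decide (PySem.Int.band ((2 ^ k : Nat) : Int) e ≠ 0) = pwBitI e k := by
  by_cases h : pwBitI e k = true
  · simp only [h, decide_eq_true_eq]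
    rw [pw_bandNe]
    exact ⟨k, by simp [Nat.testBit_two_pow], h⟩
  · have h' : pwBitI e k = false := by simpa using h
    simp only [h', decide_eq_false_iff_not, Decidable.not_not, ne_eq]
    by_contra hc
    rcases (pw_bandNe (2 ^ k) e).mp hc with ⟨j, hj1, hj2⟩
    rw [Nat.testBit_two_pow] at hj1
    have : k = j := by simpa using hj1
    subst this
    rw [h'] at hj2
    exact Bool.false_ne_true hj2

theorem pw_band_not (m v : Nat) :
    PySem.Int.band (m : Int) (Int.not (v : Int)) = ((Nat.ldiff m v : Nat) : Int) := by
  rw [pw_not_cast, pw_band_eq]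
  unfold pwMaskI
  rw [if_neg (by omega)]
  congr 1
  have h : (-(-(v:Int) - 1) - 1 : Int) = (v : Int) := by ring
  rw [h, Int.toNat_natCast]

theorem pw_mirrorA (neighbors : List Int) (pm ea eb : Int)
    (hnb : ∀ x ∈ neighbors, 0 ≤ PySem.Int.band x pm ∧
      (PySem.Int.band x pm).toNat < 2 ^ neighbors.length) :
    ∀ (fuel : Nat) (v f : Nat) (ra rb : Bool), f < 2 ^ neighbors.length →
    pwLoopA neighbors pm ea eb fuel (v : Int) (f : Int) ra rb
      = pwMA (fun k => (PySem.Int.band (neighbors.getD k 0) pm).toNat)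
          (fun k => pwBitI ea k) (fun k => pwBitI eb k) fuel v f ra rb := by
  intro fuel
  induction fuel with
  | zero => intros; rfl
  | succ fuel ih =>
    intro v f ra rb hf
    by_cases hf0 : f = 0
    · subst hf0; simp [pwLoopA, pwMA]
    have hfpos : 0 < f := Nat.pos_of_ne_zero hf0
    have htb : f.testBit (pwLowIdx f) = true := pw_testBit_lowIdx f hfpos
    have hkn : pwLowIdx f < neighbors.length := by
      by_contra hc
      rw [Nat.testBit_eq_false_of_lt (lt_of_lt_of_le hf (Nat.pow_le_pow_right (by omega) (by omega)))] at htb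
      exact Bool.false_ne_true htb
    have hbitlow : PySem.Int.band (f : Int) (-(f : Int)) = ((2 ^ pwLowIdx f : Nat) : Int) :=
      pw_band_low f hfpos
    have hidx : ((PySem.Int.bitLength ((2 ^ pwLowIdx f : Nat) : Int) : Nat) : Int) - 1 = ((pwLowIdx f : Nat) : Int) := by
      rw [pw_bitLength_two_pow]; push_cast; ring
    have hget : PySem.List.pyGet? neighbors ((pwLowIdx f : Nat) : Int) = some (neighbors.getD (pwLowIdx f) 0) := by
      rw [PySem.List.pyGet?_natCast, List.getElem?_eq_getElem hkn, List.getD_eq_getElem neighbors 0 hkn]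
    have hmem : neighbors.getD (pwLowIdx f) 0 ∈ neighbors := by
      rw [List.getD_eq_getElem neighbors 0 hkn]
      exact List.getElem_mem hkn
    obtain ⟨hnb0, hnblt⟩ := hnb _ hmem
    have hcast : PySem.Int.band (neighbors.getD (pwLowIdx f) 0) pm
        = (((PySem.Int.band (neighbors.getD (pwLowIdx f) 0) pm).toNat : Nat) : Int) :=
      (Int.toNat_of_nonneg hnb0).symm
    rw [pwLoopA, pwMA]
    rw [if_neg (show ¬ ((f : Int) = 0) by exact_mod_cast hf0), if_neg hf0]
    simp only [hbitlow, hidx, hget, pw_band_pow_edge, PySem.Int.bxor_natCast, PySem.Int.bor_natCast]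
    have hc1 : (PySem.Int.band (v : Int) ((2 ^ pwLowIdx f : Nat) : Int) ≠ 0) = (v.testBit (pwLowIdx f) = true) :=
      propext (pw_band_pow_ne v (pwLowIdx f))
    simp only [hc1]
    have hxlt : f ^^^ 2 ^ pwLowIdx f < 2 ^ neighbors.length := by
      apply pw_lt_pow_of_bits
      intro i hi
      rw [Nat.testBit_xor, Nat.testBit_two_pow] at hi
      by_cases hik : pwLowIdx f = i
      · omega
      · simp [hik] at hi
        by_contra hc
        rw [Nat.testBit_eq_false_of_lt (lt_of_lt_of_le hf (Nat.pow_le_pow_right (by omega) (by omega)))] at hi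
        exact Bool.false_ne_true hi
    by_cases hvk : v.testBit (pwLowIdx f) = true
    · simp only [hvk, if_true, if_pos]
      exact ih v (f ^^^ 2 ^ pwLowIdx f) ra rb hxlt
    · have hvk' : v.testBit (pwLowIdx f) = false := by simpa using hvk
      simp only [hvk', Bool.false_eq_true, if_false]
      by_cases hrr : ((ra || pwBitI ea (pwLowIdx f)) && (rb || pwBitI eb (pwLowIdx f))) = true
      · rw [if_pos hrr, if_pos hrr]
      · rw [if_neg hrr, if_neg hrr]
        rw [hcast, pw_band_not]
        rw [PySem.Int.bor_natCast]
        apply ih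
        apply pw_lt_pow_of_bits
        intro i hi
        rw [Nat.testBit_lor, Nat.testBit_ldiff] at hi
        rcases Bool.or_eq_true_iff.mp hi with h1 | h1
        · by_contra hc
          rw [Nat.testBit_eq_false_of_lt (lt_of_lt_of_le hxlt (Nat.pow_le_pow_right (by omega) (by omega)))] at h1
          exact Bool.false_ne_true h1
        · rcases Bool.and_eq_true_iff.mp h1 with ⟨h2, _⟩
          by_contra hc
          rw [Nat.testBit_eq_false_of_lt (lt_of_lt_of_le hnblt (Nat.pow_le_pow_right (by omega) (by omega)))] at h2
          exact Bool.false_ne_true h2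

theorem pw_succ_spec (neighbors : List Int) :
    ∀ (fuel : Nat) (m : Nat) (acc : Int),
    m < 2 ^ neighbors.length → (pwBits neighbors.length m).card < fuel →
    ∃ acc', pwSucc neighbors fuel (m : Int) acc = some acc' ∧
      ∀ j, pwBitI acc' j = (pwBitI acc j ||
        decide (∃ k ∈ pwBits neighbors.length m, pwBitI (neighbors.getD k 0) j = true)) := by
  intro fuel
  induction fuel with
  | zero => intro m acc _ hc; omega
  | succ fuel ih =>
    intro m acc hm hcard
    by_cases hm0 : m = 0
    · subst hm0
      refine ⟨acc, by simp [pwSucc], ?_⟩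
      intro j
      have he : pwBits neighbors.length 0 = ∅ := by
        ext i; simp [pw_mem_bits]
      simp [he]
    · have hmpos : 0 < m := Nat.pos_of_ne_zero hm0
      have htb : m.testBit (pwLowIdx m) = true := pw_testBit_lowIdx m hmpos
      have hkn : pwLowIdx m < neighbors.length := by
        by_contra hc
        rw [Nat.testBit_eq_false_of_lt (lt_of_lt_of_le hm (Nat.pow_le_pow_right (by omega) (by omega)))] at htb
        exact Bool.false_ne_true htb
      have hbitlow : PySem.Int.band (m : Int) (-(m : Int)) = ((2 ^ pwLowIdx m : Nat) : Int) :=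
        pw_band_low m hmpos
      have hidx : ((PySem.Int.bitLength ((2 ^ pwLowIdx m : Nat) : Int) : Nat) : Int) - 1 = ((pwLowIdx m : Nat) : Int) := by
        rw [pw_bitLength_two_pow]; push_cast; ring
      have hget : PySem.List.pyGet? neighbors ((pwLowIdx m : Nat) : Int) = some (neighbors.getD (pwLowIdx m) 0) := by
        rw [PySem.List.pyGet?_natCast, List.getElem?_eq_getElem hkn, List.getD_eq_getElem neighbors 0 hkn]
      have hxlt : m ^^^ 2 ^ pwLowIdx m < 2 ^ neighbors.length := by
        apply pw_lt_pow_of_bits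
        intro i hi
        rw [Nat.testBit_xor, Nat.testBit_two_pow] at hi
        by_cases hik : pwLowIdx m = i
        · omega
        · simp [hik] at hi
          by_contra hc
          rw [Nat.testBit_eq_false_of_lt (lt_of_lt_of_le hm (Nat.pow_le_pow_right (by omega) (by omega)))] at hi
          exact Bool.false_ne_true hi
      have hbx : pwBits neighbors.length (m ^^^ 2 ^ pwLowIdx m) = (pwBits neighbors.length m).erase (pwLowIdx m) :=
        pw_bits_xor_pow htb
      have hmemk : pwLowIdx m ∈ pwBits neighbors.length m := pw_mem_bits.mpr ⟨hkn, htb⟩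
      have hcard' : (pwBits neighbors.length (m ^^^ 2 ^ pwLowIdx m)).card < fuel := by
        rw [hbx, Finset.card_erase_of_mem hmemk]
        have : 0 < (pwBits neighbors.length m).card := Finset.card_pos.mpr ⟨_, hmemk⟩
        omega
      obtain ⟨acc', hrun, hspec⟩ := ih (m ^^^ 2 ^ pwLowIdx m)
        (PySem.Int.bor acc (neighbors.getD (pwLowIdx m) 0)) hxlt hcard'
      refine ⟨acc', ?_, ?_⟩
      · rw [pwSucc]
        rw [if_neg (show ¬ ((m : Int) = 0) by exact_mod_cast hm0)]
        simp only [hbitlow, hidx, hget, PySem.Int.bxor_natCast]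
        exact hrun
      · intro j
        have hins : insert (pwLowIdx m) (pwBits neighbors.length (m ^^^ 2 ^ pwLowIdx m)) = pwBits neighbors.length m := by
          rw [hbx]; exact Finset.insert_erase hmemk
        have hiff : (∃ k ∈ pwBits neighbors.length m, pwBitI (neighbors.getD k 0) j = true) ↔
            (pwBitI (neighbors.getD (pwLowIdx m) 0) j = true ∨
             ∃ k ∈ pwBits neighbors.length (m ^^^ 2 ^ pwLowIdx m), pwBitI (neighbors.getD k 0) j = true) := by
          rw [← hins]
          simp [Finset.mem_insert]
        rw [hspec j, pw_bitI_bor, decide_eq_decide.mpr hiff, Bool.decide_or]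
        cases pwBitI (neighbors.getD (pwLowIdx m) 0) j <;> cases pwBitI acc j <;> simp

theorem pw_fix_spec (neighbors : List Int) (pm : Int)
    (hnb : ∀ x ∈ neighbors, 0 ≤ PySem.Int.band x pm ∧
      (PySem.Int.band x pm).toNat < 2 ^ neighbors.length) :
    ∀ (fuel : Nat) (r : Nat), r < 2 ^ neighbors.length →
    neighbors.length - (pwBits neighbors.length r).card < fuel →
    ∃ R : Nat, pwFix neighbors pm fuel (r : Int) = (R : Int) ∧ R < 2 ^ neighbors.length ∧
      (∀ j, r.testBit j = true → R.testBit j = true) ∧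
      (∀ k j, R.testBit k = true → ((PySem.Int.band (neighbors.getD k 0) pm).toNat).testBit j = true → R.testBit j = true) ∧
      (∀ V : Nat, (∀ j, r.testBit j = true → V.testBit j = true) →
        (∀ k j, V.testBit k = true → ((PySem.Int.band (neighbors.getD k 0) pm).toNat).testBit j = true → V.testBit j = true) →
        ∀ j, R.testBit j = true → V.testBit j = true) := by
  intro fuel
  induction fuel with
  | zero => intro r _ hc; omega
  | succ fuel ih =>
    intro r hr hfuel
    obtain ⟨acc', hrun, hspec⟩ := pw_succ_spec neighbors (neighbors.length + 1) r 0
      hr (by have := pw_bits_card_le neighbors.length r; omega)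
    have hacc0 : ∀ j, pwBitI (0 : Int) j = false := by
      intro j; unfold pwBitI; simp
    have hmemget : ∀ k, k ∈ pwBits neighbors.length r → neighbors.getD k 0 ∈ neighbors := by
      intro k hk
      have hkn : k < neighbors.length := (pw_mem_bits.mp hk).1
      rw [List.getD_eq_getElem neighbors 0 hkn]
      exact List.getElem_mem hkn
    -- S := acc' & pm, the one-round successor mask; nonnegative with bits below the board size
    have hSbit : ∀ j, pwBitI (PySem.Int.band acc' pm) j = true ↔
        ∃ k ∈ pwBits neighbors.length r,
          ((PySem.Int.band (neighbors.getD k 0) pm).toNat).testBit j = true := by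
      intro j
      rw [pw_bitI_band, Bool.and_eq_true_iff]
      constructor
      · rintro ⟨h1, h2⟩
        rw [hspec j, hacc0 j, Bool.false_or, decide_eq_true_eq] at h1
        obtain ⟨k, hk, hknb⟩ := h1
        refine ⟨k, hk, ?_⟩
        have hnn := (hnb _ (hmemget k hk)).1
        have hbv : pwBitI (PySem.Int.band (neighbors.getD k 0) pm) j = true := by
          rw [pw_bitI_band, hknb, h2]; rfl
        rw [← pw_bitI_natCast ((PySem.Int.band (neighbors.getD k 0) pm).toNat) j,
            Int.toNat_of_nonneg hnn]
        exact hbv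
      · rintro ⟨k, hk, hknb⟩
        have hnn := (hnb _ (hmemget k hk)).1
        rw [← pw_bitI_natCast (PySem.Int.band (neighbors.getD k 0) pm).toNat j,
            Int.toNat_of_nonneg hnn, pw_bitI_band, Bool.and_eq_true_iff] at hknb
        refine ⟨?_, hknb.2⟩
        rw [hspec j, hacc0 j, Bool.false_or, decide_eq_true_eq]
        exact ⟨k, hk, hknb.1⟩
    have hSlow : ∀ j, pwBitI (PySem.Int.band acc' pm) j = true → j < neighbors.length := by
      intro j hj
      obtain ⟨k, hk, hknb⟩ := (hSbit j).mp hj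
      have hlt := (hnb _ (hmemget k hk)).2
      by_contra hc
      rw [Nat.testBit_eq_false_of_lt (lt_of_lt_of_le hlt (Nat.pow_le_pow_right (by omega) (by omega)))] at hknb
      exact Bool.false_ne_true hknb
    have hS0 : 0 ≤ PySem.Int.band acc' pm := pw_nonneg_of_bitI _ neighbors.length hSlow
    have hScast : PySem.Int.band acc' pm = (((PySem.Int.band acc' pm).toNat : Nat) : Int) :=
      (Int.toNat_of_nonneg hS0).symm
    have hsN : ∀ j, ((PySem.Int.band acc' pm).toNat).testBit j = true ↔
        ∃ k ∈ pwBits neighbors.length r,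
          ((PySem.Int.band (neighbors.getD k 0) pm).toNat).testBit j = true := by
      intro j
      rw [← pw_bitI_natCast, ← hScast]
      exact hSbit j
    have hslt : (PySem.Int.band acc' pm).toNat < 2 ^ neighbors.length := by
      apply pw_lt_pow_of_bits
      intro i hi
      obtain ⟨k, hk, hknb⟩ := (hsN i).mp hi
      have hlt := (hnb _ (hmemget k hk)).2
      by_contra hc
      rw [Nat.testBit_eq_false_of_lt (lt_of_lt_of_le hlt (Nat.pow_le_pow_right (by omega) (by omega)))] at hknb
      exact Bool.false_ne_true hknb
    have hr1lt : (r ||| (PySem.Int.band acc' pm).toNat) < 2 ^ neighbors.length := by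
      apply pw_lt_pow_of_bits
      intro i hi
      rw [Nat.testBit_lor] at hi
      rcases Bool.or_eq_true_iff.mp hi with h1 | h1
      · by_contra hc
        rw [Nat.testBit_eq_false_of_lt (lt_of_lt_of_le hr (Nat.pow_le_pow_right (by omega) (by omega)))] at h1
        exact Bool.false_ne_true h1
      · by_contra hc
        rw [Nat.testBit_eq_false_of_lt (lt_of_lt_of_le hslt (Nat.pow_le_pow_right (by omega) (by omega)))] at h1
        exact Bool.false_ne_true h1
    rw [pwFix, hrun]
    dsimp only
    rw [hScast, PySem.Int.bor_natCast]
    by_cases heq : ((r ||| (PySem.Int.band acc' pm).toNat : Nat) : Int) = (r : Int)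
    · rw [if_pos heq]
      have heqn : r ||| (PySem.Int.band acc' pm).toNat = r := by exact_mod_cast heq
      refine ⟨r, rfl, hr, fun j h => h, ?_, ?_⟩
      · intro k j hk hkj
        have hkmem : k ∈ pwBits neighbors.length r := (pw_mem_bits_of_lt hr k).mpr hk
        have : (r ||| (PySem.Int.band acc' pm).toNat).testBit j = true := by
          rw [Nat.testBit_lor, (hsN j).mpr ⟨k, hkmem, hkj⟩, Bool.or_true]
        rwa [heqn] at this
      · intro V hV _ j hj
        exact hV j hj
    · rw [if_neg heq]
      have hneq : r ||| (PySem.Int.band acc' pm).toNat ≠ r := fun h => heq (by exact_mod_cast congrArg (Nat.cast : Nat → Int) h)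
      have hsub : ∀ j, r.testBit j = true → (r ||| (PySem.Int.band acc' pm).toNat).testBit j = true := by
        intro j hj; rw [Nat.testBit_lor, hj, Bool.true_or]
      have hsubF : pwBits neighbors.length r ⊆ pwBits neighbors.length (r ||| (PySem.Int.band acc' pm).toNat) := by
        intro i hi
        rcases pw_mem_bits.mp hi with ⟨h1, h2⟩
        exact pw_mem_bits.mpr ⟨h1, hsub i h2⟩
      have hneqF : pwBits neighbors.length r ≠ pwBits neighbors.length (r ||| (PySem.Int.band acc' pm).toNat) := by
        intro hEq
        apply hneq
        apply Nat.eq_of_testBit_eq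
        intro i
        have h1 := pw_mem_bits_of_lt hr1lt i
        have h2 := pw_mem_bits_of_lt hr i
        rw [← hEq] at h1
        cases hbit : (r ||| (PySem.Int.band acc' pm).toNat).testBit i
        · cases hbit2 : r.testBit i
          · rfl
          · exact absurd (h1.mp (h2.mpr hbit2)) (by simp [hbit])
        · exact (h2.mp (h1.mpr hbit)).symm
      have hcardlt : (pwBits neighbors.length r).card < (pwBits neighbors.length (r ||| (PySem.Int.band acc' pm).toNat)).card :=
        Finset.card_lt_card (ssubset_of_subset_of_ne hsubF hneqF)
      have hfuel' : neighbors.length - (pwBits neighbors.length (r ||| (PySem.Int.band acc' pm).toNat)).card < fuel := by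
        have hc1 := pw_bits_card_le neighbors.length (r ||| (PySem.Int.band acc' pm).toNat)
        omega
      obtain ⟨R, hRrun, hRlt, hRgrow, hRclosed, hRmin⟩ := ih (r ||| (PySem.Int.band acc' pm).toNat) hr1lt hfuel'
      refine ⟨R, hRrun, hRlt, ?_, hRclosed, ?_⟩
      · intro j hj
        exact hRgrow j (hsub j hj)
      · intro V hV hVc j hj
        refine hRmin V ?_ hVc j hj
        intro i hi
        rw [Nat.testBit_lor] at hi
        rcases Bool.or_eq_true_iff.mp hi with h1 | h1
        · exact hV i h1
        · obtain ⟨k, hk, hnbk⟩ := (hsN i).mp h1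
          have hkV : V.testBit k = true := hV k ((pw_mem_bits_of_lt hr k).mp hk)
          exact hVc k i hkV hnbk


def pwAny (n x : Nat) (P : Nat → Bool) : Bool := (List.range n).any fun j => x.testBit j && P j

theorem pw_any_iff (n x : Nat) (P : Nat → Bool) :
    pwAny n x P = true ↔ ∃ j, j < n ∧ x.testBit j = true ∧ P j = true := by
  simp [pwAny, List.any_eq_true, List.mem_range, and_assoc]

theorem pw_any_insert (n k x : Nat) (hk : k < n) (P : Nat → Bool) :
    pwAny n (x ||| 2 ^ k) P = (pwAny n x P || P k) := by
  apply Bool.coe_iff_coe.mp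
  rw [Bool.or_eq_true, pw_any_iff, pw_any_iff]
  constructor
  · rintro ⟨j, hjn, hjb, hjP⟩
    rw [Nat.testBit_lor] at hjb
    rcases Bool.or_eq_true_iff.mp hjb with h | h
    · exact Or.inl ⟨j, hjn, h, hjP⟩
    · rw [Nat.testBit_two_pow] at h
      have : k = j := by simpa using h
      subst this
      exact Or.inr hjP
  · rintro (⟨j, hjn, hjb, hjP⟩ | hPk)
    · exact ⟨j, hjn, by rw [Nat.testBit_lor, hjb, Bool.true_or], hjP⟩
    · exact ⟨k, hk, by rw [Nat.testBit_lor, Nat.testBit_two_pow]; simp, hPk⟩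

theorem pw_mA_spec (n : Nat) (nbm : Nat → Nat) (Ea Eb : Nat → Bool)
    (R : Nat) (move : Nat) (hRlt : R < 2 ^ n)
    (hclosed : ∀ k j, R.testBit k = true → (nbm k).testBit j = true → R.testBit j = true)
    (hmin : ∀ V : Nat, V.testBit move = true →
        (∀ k j, V.testBit k = true → (nbm k).testBit j = true → V.testBit j = true) →
        ∀ j, R.testBit j = true → V.testBit j = true) :
    ∀ (fuel : Nat) (v f : Nat) (ra rb : Bool),
    (∀ j, v.testBit j = true → R.testBit j = true) →
    (∀ j, f.testBit j = true → R.testBit j = true) →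
    (∀ k, v.testBit k = true → ∀ j, (nbm k).testBit j = true → (v.testBit j || f.testBit j) = true) →
    ra = pwAny n v Ea →
    rb = pwAny n v Eb →
    (ra && rb) = false →
    (v.testBit move || f.testBit move) = true →
    (n - (pwBits n v).card) * (n + 1) + (pwBits n f).card < fuel →
    pwMA nbm Ea Eb fuel v f ra rb = (pwAny n R Ea && pwAny n R Eb) := by
  intro fuel
  induction fuel with
  | zero => intro v f ra rb _ _ _ _ _ _ _ hfuel; omega
  | succ fuel ih =>
    intro v f ra rb hvR hfR hI2 hra hrb hI6 hI4 hfuel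
    have hRbits : ∀ i, R.testBit i = true → i < n := by
      intro i hi
      by_contra hc
      rw [Nat.testBit_eq_false_of_lt (lt_of_lt_of_le hRlt (Nat.pow_le_pow_right (by omega) (by omega)))] at hi
      exact Bool.false_ne_true hi
    have hvlt : v < 2 ^ n := pw_lt_pow_of_bits (fun i hi => hRbits i (hvR i hi))
    have hflt : f < 2 ^ n := pw_lt_pow_of_bits (fun i hi => hRbits i (hfR i hi))
    by_cases hf0 : f = 0
    · subst hf0
      have hveq : v = R := by
        apply Nat.eq_of_testBit_eq
        intro i
        cases hvb : v.testBit i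
        · cases hRb : R.testBit i
          · rfl
          · exfalso
            have hvmove : v.testBit move = true := by
              rcases Bool.or_eq_true_iff.mp hI4 with h | h
              · exact h
              · rw [Nat.zero_testBit] at h; exact absurd h Bool.false_ne_true
            have hvclosed : ∀ k j, v.testBit k = true → (nbm k).testBit j = true → v.testBit j = true := by
              intro k j hk hj
              have := hI2 k hk j hj
              rwa [Nat.zero_testBit, Bool.or_false] at this
            have := hmin v hvmove hvclosed i hRb
            rw [this] at hvb
            exact Bool.false_ne_true hvb.symm
        · exact (hvR i hvb).symm
      rw [pwMA, if_pos rfl, ← hveq, ← hra, ← hrb, hI6]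
    · have hfpos : 0 < f := Nat.pos_of_ne_zero hf0
      have htb : f.testBit (pwLowIdx f) = true := pw_testBit_lowIdx f hfpos
      have hkn : pwLowIdx f < n := by
        by_contra hc
        rw [Nat.testBit_eq_false_of_lt (lt_of_lt_of_le hflt (Nat.pow_le_pow_right (by omega) (by omega)))] at htb
        exact Bool.false_ne_true htb
      have hkR : R.testBit (pwLowIdx f) = true := hfR _ htb
      have hkf : pwLowIdx f ∈ pwBits n f := pw_mem_bits.mpr ⟨hkn, htb⟩
      have hcardf : 0 < (pwBits n f).card := Finset.card_pos.mpr ⟨_, hkf⟩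
      have hbxf : pwBits n (f ^^^ 2 ^ pwLowIdx f) = (pwBits n f).erase (pwLowIdx f) := pw_bits_xor_pow htb
      rw [pwMA, if_neg hf0]
      by_cases hvk : v.testBit (pwLowIdx f) = true
      · rw [if_pos hvk]
        apply ih v (f ^^^ 2 ^ pwLowIdx f) ra rb hvR
        · intro j hj
          rw [Nat.testBit_xor] at hj
          cases hfj : f.testBit j
          · rw [hfj, Nat.testBit_two_pow] at hj
            simp only [Bool.false_xor, decide_eq_true_eq] at hj
            subst hj
            rw [htb] at hfj
            exact absurd hfj.symm Bool.false_ne_true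
          · exact hfR j hfj
        · intro k' hk' j hj
          rcases Bool.or_eq_true_iff.mp (hI2 k' hk' j hj) with h | h
          · rw [h, Bool.true_or]
          · by_cases hjk : j = pwLowIdx f
            · subst hjk; rw [hvk, Bool.true_or]
            · rw [Nat.testBit_xor, h, Nat.testBit_two_pow]
              have hne : ¬ (pwLowIdx f = j) := fun hh => hjk hh.symm
              simp [hne]
        · exact hra
        · exact hrb
        · exact hI6
        · rcases Bool.or_eq_true_iff.mp hI4 with h | h
          · rw [h, Bool.true_or]
          · by_cases hmk : move = pwLowIdx f
            · rw [hmk, hvk, Bool.true_or]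
            · rw [Nat.testBit_xor, h, Nat.testBit_two_pow]
              have hne : ¬ (pwLowIdx f = move) := fun hh => hmk hh.symm
              simp [hne]
        · rw [hbxf, Finset.card_erase_of_mem hkf]
          omega
      · rw [if_neg hvk]
        have hvk' : v.testBit (pwLowIdx f) = false := by simpa using hvk
        have hkvmem : pwLowIdx f ∉ pwBits n v := fun hmem => by
          rw [pw_mem_bits] at hmem
          rw [hmem.2] at hvk'
          exact absurd hvk'.symm Bool.false_ne_true
        have hbv1 : pwBits n (v ||| 2 ^ pwLowIdx f) = insert (pwLowIdx f) (pwBits n v) := pw_bits_or_pow hkn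
        have hra1 : (ra || Ea (pwLowIdx f)) = pwAny n (v ||| 2 ^ pwLowIdx f) Ea := by
          rw [pw_any_insert n (pwLowIdx f) v hkn Ea, hra]
        have hrb1 : (rb || Eb (pwLowIdx f)) = pwAny n (v ||| 2 ^ pwLowIdx f) Eb := by
          rw [pw_any_insert n (pwLowIdx f) v hkn Eb, hrb]
        have hv1R : ∀ j, (v ||| 2 ^ pwLowIdx f).testBit j = true → R.testBit j = true := by
          intro j hj
          rw [Nat.testBit_lor] at hj
          rcases Bool.or_eq_true_iff.mp hj with h | h
          · exact hvR j h
          · rw [Nat.testBit_two_pow] at h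
            have : pwLowIdx f = j := by simpa using h
            subst this
            exact hkR
        by_cases hrr : ((ra || Ea (pwLowIdx f)) && (rb || Eb (pwLowIdx f))) = true
        · rw [if_pos hrr]
          rcases Bool.and_eq_true_iff.mp hrr with ⟨h1, h2⟩
          rw [hra1] at h1
          rw [hrb1] at h2
          obtain ⟨j1, hj1n, hj1b, hj1P⟩ := (pw_any_iff _ _ _).mp h1
          obtain ⟨j2, hj2n, hj2b, hj2P⟩ := (pw_any_iff _ _ _).mp h2
          rw [(pw_any_iff n R Ea).mpr ⟨j1, hj1n, hv1R j1 hj1b, hj1P⟩,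
              (pw_any_iff n R Eb).mpr ⟨j2, hj2n, hv1R j2 hj2b, hj2P⟩]
          rfl
        · rw [if_neg hrr]
          have hnbmR : ∀ j, (nbm (pwLowIdx f)).testBit j = true → R.testBit j = true :=
            fun j hj => hclosed _ j hkR hj
          apply ih (v ||| 2 ^ pwLowIdx f)
            (f ^^^ 2 ^ pwLowIdx f ||| Nat.ldiff (nbm (pwLowIdx f)) (v ||| 2 ^ pwLowIdx f))
            (ra || Ea (pwLowIdx f)) (rb || Eb (pwLowIdx f)) hv1R
          · intro j hj
            rw [Nat.testBit_lor] at hj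
            rcases Bool.or_eq_true_iff.mp hj with h | h
            · rw [Nat.testBit_xor] at h
              cases hfj : f.testBit j
              · rw [hfj, Nat.testBit_two_pow] at h
                simp only [Bool.false_xor, decide_eq_true_eq] at h
                subst h
                rw [htb] at hfj
                exact absurd hfj.symm Bool.false_ne_true
              · exact hfR j hfj
            · rw [Nat.testBit_ldiff] at h
              exact hnbmR j (Bool.and_eq_true_iff.mp h).1
          · intro k' hk' j hj
            rw [Nat.testBit_lor] at hk'
            rcases Bool.or_eq_true_iff.mp hk' with hkv | hkp
            · rcases Bool.or_eq_true_iff.mp (hI2 k' hkv j hj) with h | h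
              · rw [Nat.testBit_lor, h, Bool.true_or, Bool.true_or]
              · by_cases hjk : j = pwLowIdx f
                · subst hjk
                  rw [Nat.testBit_lor, Nat.testBit_two_pow]
                  simp
                · rw [Nat.testBit_lor, Nat.testBit_lor, Nat.testBit_xor, h, Nat.testBit_two_pow]
                  have hne : ¬ (pwLowIdx f = j) := fun hh => hjk hh.symm
                  simp [hne]
            · rw [Nat.testBit_two_pow] at hkp
              have : pwLowIdx f = k' := by simpa using hkp
              subst this
              cases hv1j : (v ||| 2 ^ pwLowIdx f).testBit j
              · rw [Bool.false_or, Nat.testBit_lor, Nat.testBit_ldiff, hj, hv1j]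
                simp
              · rw [Bool.true_or]
          · exact hra1
          · exact hrb1
          · simpa using hrr
          · rcases Bool.or_eq_true_iff.mp hI4 with h | h
            · rw [Nat.testBit_lor, h, Bool.true_or, Bool.true_or]
            · by_cases hmk : move = pwLowIdx f
              · subst hmk
                rw [Nat.testBit_lor, Nat.testBit_two_pow]
                simp
              · rw [Nat.testBit_lor, Nat.testBit_lor, Nat.testBit_xor, h, Nat.testBit_two_pow]
                have hne : ¬ (pwLowIdx f = move) := fun hh => hmk hh.symm
                simp [hne]
          · have hcv1 : (pwBits n (v ||| 2 ^ pwLowIdx f)).card = (pwBits n v).card + 1 := by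
              rw [hbv1, Finset.card_insert_of_notMem hkvmem]
            have hcv1le : (pwBits n v).card + 1 ≤ n := by
              rw [← hcv1]
              exact pw_bits_card_le n _
            have hcf2 : (pwBits n (f ^^^ 2 ^ pwLowIdx f ||| Nat.ldiff (nbm (pwLowIdx f)) (v ||| 2 ^ pwLowIdx f))).card ≤ n :=
              pw_bits_card_le n _
            have hsplit : n - (pwBits n v).card = (n - ((pwBits n v).card + 1)) + 1 := by omega
            rw [hcv1]
            rw [hsplit, Nat.add_mul, one_mul] at hfuel
            omega

theorem pw_any_zero (n : Nat) (P : Nat → Bool) : pwAny n 0 P = false := by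
  simp [pwAny, Nat.zero_testBit]

theorem pw_bits_zero (n : Nat) : pwBits n 0 = ∅ := by
  ext i; simp [pw_mem_bits, Nat.zero_testBit]

theorem pw_bits_pow (n m : Nat) (hm : m < n) : pwBits n (2 ^ m) = {m} := by
  ext i
  rw [pw_mem_bits, Finset.mem_singleton, Nat.testBit_two_pow]
  constructor
  · rintro ⟨_, h⟩
    have : m = i := by simpa using h
    omega
  · intro h
    subst h
    exact ⟨hm, by simp⟩

theorem pw_band_any (n x : Nat) (hx : x < 2 ^ n) (e : Int) :
    decide (PySem.Int.band (x : Int) e ≠ 0) = pwAny n x (fun j => pwBitI e j) := by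
  apply Bool.coe_iff_coe.mp
  rw [decide_eq_true_eq, pw_bandNe, pw_any_iff]
  constructor
  · rintro ⟨j, hj1, hj2⟩
    refine ⟨j, ?_, hj1, hj2⟩
    by_contra hc
    rw [Nat.testBit_eq_false_of_lt (lt_of_lt_of_le hx (Nat.pow_le_pow_right (by omega) (by omega)))] at hj1
    exact Bool.false_ne_true hj1
  · rintro ⟨j, _, hj1, hj2⟩
    exact ⟨j, hj1, hj2⟩

theorem pw_main (player_mask move_idx : Int) (neighbors : List Int) (edge_a edge_b : Int)
    (hpre : Pre_player_wins_with_move player_mask move_idx neighbors edge_a edge_b) :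
    player_wins_with_move player_mask move_idx neighbors edge_a edge_b
      = player_wins_with_move_alt player_mask move_idx neighbors edge_a edge_b := by
  obtain ⟨h0, h1, h2⟩ := hpre
  have hnb : ∀ x ∈ neighbors, 0 ≤ PySem.Int.band x player_mask ∧
      (PySem.Int.band x player_mask).toNat < 2 ^ neighbors.length := by
    intro x hx
    obtain ⟨ha, hb⟩ := h2 x hx
    refine ⟨ha, ?_⟩
    have hcast : ((2 ^ neighbors.length : Nat) : Int) = (2 : Int) ^ neighbors.length := by push_cast; ring
    omega
  have hmn : move_idx.toNat < neighbors.length := by omega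
  have hshift : (1 : Int) <<< move_idx.toNat = ((2 ^ move_idx.toNat : Nat) : Int) := by
    simp [Int.shiftLeft_eq]
  have hflt : (2 : Nat) ^ move_idx.toNat < 2 ^ neighbors.length :=
    Nat.pow_lt_pow_right (by omega) hmn
  have hbitsm : pwBits neighbors.length (2 ^ move_idx.toNat) = {move_idx.toNat} :=
    pw_bits_pow _ _ hmn
  obtain ⟨R, hfix, hRlt, hRgrow, hRclosed, hRmin⟩ :=
    pw_fix_spec neighbors player_mask hnb (neighbors.length + 2) (2 ^ move_idx.toNat) hflt
      (by rw [hbitsm, Finset.card_singleton]; omega)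
  have hmR : R.testBit move_idx.toNat = true := hRgrow _ (by simp)
  have hnot : ¬ (move_idx < 0) := by omega
  have hB : player_wins_with_move_alt player_mask move_idx neighbors edge_a edge_b
      = (pwAny neighbors.length R (fun j => pwBitI edge_a j) && pwAny neighbors.length R (fun j => pwBitI edge_b j)) := by
    unfold player_wins_with_move_alt
    rw [if_neg hnot]
    rw [hshift, hfix]
    dsimp only
    rw [pw_band_any neighbors.length R hRlt edge_a, pw_band_any neighbors.length R hRlt edge_b]
  have hA : player_wins_with_move player_mask move_idx neighbors edge_a edge_b
      = pwMA (fun k => (PySem.Int.band (neighbors.getD k 0) player_mask).toNat)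
          (fun k => pwBitI edge_a k) (fun k => pwBitI edge_b k)
          ((neighbors.length + 1) * (neighbors.length + 1) + 2) 0 (2 ^ move_idx.toNat) false false := by
    unfold player_wins_with_move
    rw [if_neg hnot, hshift]
    rw [show (0 : Int) = ((0 : Nat) : Int) by simp]
    exact pw_mirrorA neighbors player_mask edge_a edge_b hnb _ 0 (2 ^ move_idx.toNat) false false hflt
  rw [hA, hB]
  apply pw_mA_spec neighbors.length
    (fun k => (PySem.Int.band (neighbors.getD k 0) player_mask).toNat)
    (fun k => pwBitI edge_a k) (fun k => pwBitI edge_b k) R move_idx.toNat hRlt hRclosed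
  · intro V hVm hVc j hj
    refine hRmin V ?_ hVc j hj
    intro i hi
    rw [Nat.testBit_two_pow] at hi
    have : move_idx.toNat = i := by simpa using hi
    subst this
    exact hVm
  · intro j hj
    rw [Nat.zero_testBit] at hj
    exact absurd hj Bool.false_ne_true
  · intro j hj
    rw [Nat.testBit_two_pow] at hj
    have : move_idx.toNat = j := by simpa using hj
    subst this
    exact hmR
  · intro k hk
    rw [Nat.zero_testBit] at hk
    exact absurd hk Bool.false_ne_true
  · rw [pw_any_zero]
  · rw [pw_any_zero]
  · rfl
  · rw [Nat.testBit_two_pow]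
    simp
  · rw [pw_bits_zero, hbitsm, Finset.card_empty, Finset.card_singleton]
    simp only [Nat.sub_zero]
    have hmul : (neighbors.length + 1) * (neighbors.length + 1)
        = neighbors.length * (neighbors.length + 1) + (neighbors.length + 1) := by ring
    omega

-- ===== VERDICT (by name: the statement is the Claim_ definition above) =====
theorem player_wins_with_move_spec : Claim_equal_player_wins_with_move := by
  intro player_mask move_idx neighbors edge_a edge_b _ hpre
  unfold Spec_player_wins_with_move
  exact pw_main player_mask move_idx neighbors edge_a edge_b hpre
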